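-- pv_equiv track=rewrite | github.com/NasBad/python-projects | mman12python/mmn12.py | biggest_sum
-- ===== SOURCE A (Python) =====
-- def biggest_sum(inner_arr):
--     """
--         Calculates the largest sum of consecutive positive integers in the given array,
--         resetting the sum to 0 whenever a zero is encountered.
--
--         Parameters:
--             inner_arr (list of int): A list of positive integers. All elements must be non-negative.
--
--         Returns:
--             int: The maximum sum of consecutive positive integers before a zero resets the summation.
--
--         Raises:
--             TypeError: If any element in the array is not a positive integer.
--     """
--     num_sum = 0
--     num_max = 0
--     arr_len=len(inner_arr)
--     if not all(isinstance(x, int) and x > -1 for x in inner_arr):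
--         raise TypeError("All elements in the array must be positive integers")
--     for i in range(0,arr_len,1):
--         num_sum = num_sum + inner_arr[i]
--         num_max = max(num_sum, num_max)
--         if inner_arr[i]==0:
--             num_sum=0
--
--     return num_max
-- ===== SOURCE B (Python) =====
-- def biggest_sum(inner_arr):
--     if not all(isinstance(x, int) and x > -1 for x in inner_arr):
--         raise TypeError("All elements in the array must be positive integers")
--     segments = []
--     cur = []
--     for x in inner_arr:
--         if x == 0:
--             segments.append(cur)
--             cur = []
--         else:
--             cur.append(x)
--     segments.append(cur)
--     return max((sum(seg) for seg in segments), default=0)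
-- ===== Notes on version B (the rewrite author's own statement) =====
-- stated objective: alternative
-- what changed: B splits the list into zero-delimited segments and returns the maximum segment sum (seeded at 0), instead of A's single running-sum-with-reset scan that maintains a running max.
-- outside the precondition, e.g. on biggest_sum([1, -2, 3]): A raises TypeError, B raises TypeError
import Mathlib
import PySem

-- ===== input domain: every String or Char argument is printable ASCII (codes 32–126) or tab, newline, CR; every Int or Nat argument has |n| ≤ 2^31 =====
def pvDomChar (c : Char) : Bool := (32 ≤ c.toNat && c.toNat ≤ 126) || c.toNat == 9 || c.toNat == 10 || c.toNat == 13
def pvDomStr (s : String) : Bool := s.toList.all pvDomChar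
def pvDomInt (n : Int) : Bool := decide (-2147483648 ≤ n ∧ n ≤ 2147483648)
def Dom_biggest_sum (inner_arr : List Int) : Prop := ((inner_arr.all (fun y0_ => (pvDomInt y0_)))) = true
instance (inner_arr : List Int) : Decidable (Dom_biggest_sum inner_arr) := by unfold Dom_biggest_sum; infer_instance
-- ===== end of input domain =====

-- B replaces A's running-sum-with-reset scan by a split-into-zero-delimited-segments
-- then max-of-segment-sums two-stage structure (objective: alternative decomposition).

-- ===== PORT A =====
-- single scan: running sum, running max, reset sum on 0 (validation is Pre_)
def biggest_sum (inner_arr : List Int) : Int :=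
  (inner_arr.foldl (fun (st : Int × Int) x =>
      let num_sum := st.1 + x
      let num_max := max num_sum st.2
      (if x = 0 then 0 else num_sum, num_max)) (0, 0)).2

-- ===== PORT B =====
-- split into segments delimited by zeros, then max of segment sums seeded at 0
def biggest_sum_alt (inner_arr : List Int) : Int :=
  let st := inner_arr.foldl (fun (st : List (List Int) × List Int) x =>
      if x = 0 then (st.1 ++ [st.2], []) else (st.1, st.2 ++ [x])) ([], [])
  (((st.1 ++ [st.2]).map List.sum).foldl max 0)

-- ===== PRECONDITION & SPEC =====
-- Pre_ excludes inputs with a negative element, on which A raises TypeError (B raises too).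
def Pre_biggest_sum (inner_arr : List Int) : Prop :=
  (inner_arr.all (fun x => -1 < x)) = true
instance (inner_arr : List Int) : Decidable (Pre_biggest_sum inner_arr) := by
  unfold Pre_biggest_sum; infer_instance
def pvWitness_biggest_sum : List Int := [1, 2, 0, 3]
def Spec_biggest_sum (inner_arr : List Int) (out : Int) : Prop := out = biggest_sum_alt inner_arr
instance (inner_arr : List Int) (out : Int) : Decidable (Spec_biggest_sum inner_arr out) := by unfold Spec_biggest_sum; infer_instance

-- ===== CLAIM (what is proved, stated in full; the proofs are below) =====
def Claim_equal_biggest_sum : Prop := ∀ (inner_arr : List Int), Dom_biggest_sum inner_arr → Pre_biggest_sum inner_arr → Spec_biggest_sum inner_arr (biggest_sum inner_arr)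

-- ===== LEMMAS AND PROOFS =====

-- loop invariant: A's (sum, max) state corresponds to B's (segments, current) state
lemma pv_loop_eq : ∀ (xs : List Int) (segs : List (List Int)) (cur : List Int) (s m : Int),
    (∀ x ∈ xs, 0 ≤ x) → s = cur.sum → 0 ≤ m →
    m = max ((segs.map List.sum).foldl max 0) cur.sum →
    (xs.foldl (fun (st : Int × Int) x =>
        let num_sum := st.1 + x
        let num_max := max num_sum st.2
        (if x = 0 then 0 else num_sum, num_max)) (s, m)).2 =
      (let st := xs.foldl (fun (st : List (List Int) × List Int) x =>
          if x = 0 then (st.1 ++ [st.2], []) else (st.1, st.2 ++ [x])) (segs, cur)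
       (((st.1 ++ [st.2]).map List.sum).foldl max 0)) := by
  intro xs
  induction xs with
  | nil =>
    intro segs cur s m _ hs hm0 hm
    simp [List.foldl_append, hm]
  | cons x xs ih =>
    intro segs cur s m hx hs hm0 hm
    have hx0 : (0 : Int) ≤ x := hx x (by simp)
    have hxs : ∀ y ∈ xs, (0 : Int) ≤ y := fun y hy => hx y (by simp [hy])
    by_cases h : x = 0
    · subst h
      simp only [List.foldl_cons, reduceIte]
      have hsm : max (s + 0) m = m := by omega
      rw [hsm]
      apply ih (segs ++ [cur]) [] 0 m hxs (by simp) hm0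
      simp [List.foldl_append, hm]
      omega
    · simp only [List.foldl_cons, if_neg h]
      apply ih segs (cur ++ [x]) (s + x) (max (s + x) m) hxs (by simp [hs]) (by omega)
      simp [hs] at hm ⊢
      omega

theorem pv_main (inner_arr : List Int) (hpre : Pre_biggest_sum inner_arr) :
    biggest_sum inner_arr = biggest_sum_alt inner_arr := by
  unfold biggest_sum biggest_sum_alt
  apply pv_loop_eq inner_arr [] [] 0 0 _ rfl le_rfl (by simp)
  intro x hx
  unfold Pre_biggest_sum at hpre
  simp only [List.all_eq_true, decide_eq_true_eq] at hpre
  have := hpre x hx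
  omega

-- ===== VERDICT (by name: the statement is the Claim_ definition above) =====
theorem biggest_sum_spec : Claim_equal_biggest_sum := by
  intro inner_arr _ hpre
  exact pv_main inner_arr hpre
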